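-- pv_equiv track=rewrite | github.com/KjerstiOW/collatz | final.py | encode_integer
-- ===== SOURCE A (Python) =====
-- def check_parity(n: int):
--     """
--     Throws an error if `n` is odd.
--
--     Parameters:
--         n (int): The integer to check.
--
--     Returns:
--         bool: True if `n` is odd.
--
--     Raises:
--         ValueError: If `n` is not odd.
--     """
--
--     if n % 2 == 0:
--         raise ValueError(f"{n} must be an odd integer")
--     return True
--
-- def encode_integer(n: int):
--     """
--     Encode an odd integer into its inverse Collatz list.
--
--     Parameters:
--         n (int): An odd positive integer to encode.
--
--     Returns:
--         list[int]: The inverse Collatz encoding of `n`.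
--
--     Raises:
--         ValueError: If `n` is not odd.
--
--     Example:
--         >>> encode_integer(7)
--         [1, 1, 2, 3, 4]
--     """
--     check_parity(n)
--
--     lst = []
--
--     while n != 1:
--         if n % 2 == 0:
--             lst[-1] += 1
--             n //= 2
--         else:
--             lst.append(0)
--             n = 3*n + 1
--
--     return lst
-- ===== SOURCE B (Python) =====
-- def check_parity(n: int):
--     if n % 2 == 0:
--         raise ValueError(f"{n} must be an odd integer")
--     return True
--
-- def encode_integer(n: int):
--     check_parity(n)
--     lst = []
--     while n != 1:
--         m = 3 * n + 1
--         c = 0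
--         while m % 2 == 0:
--             m //= 2
--             c += 1
--         lst.append(c)
--         n = m
--     return lst
-- ===== Notes on version B (the rewrite author's own statement) =====
-- stated objective: alternative
-- what changed: A's single flat loop that branches on parity and mutates lst[-1] is replaced by a nested decomposition: an outer loop per odd step computing 3n+1 and an inner loop counting the trailing halvings, appending the finished count once.
import Mathlib
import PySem

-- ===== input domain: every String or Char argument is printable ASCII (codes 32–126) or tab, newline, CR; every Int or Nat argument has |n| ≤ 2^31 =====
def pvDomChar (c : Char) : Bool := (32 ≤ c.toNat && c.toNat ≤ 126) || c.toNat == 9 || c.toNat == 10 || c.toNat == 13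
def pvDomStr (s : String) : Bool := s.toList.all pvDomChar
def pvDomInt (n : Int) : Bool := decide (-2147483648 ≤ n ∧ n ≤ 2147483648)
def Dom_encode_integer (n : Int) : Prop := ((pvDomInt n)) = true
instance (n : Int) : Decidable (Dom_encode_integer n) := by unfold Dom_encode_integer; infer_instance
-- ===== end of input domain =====

-- B replaces A's flat parity-branching loop (which mutates lst[-1]) by a nested
-- odd-step / halving-count decomposition appending each count once; return values agree on Pre_.

-- ===== PORT A =====
-- lst[-1] += 1; Python raises IndexError on [], which the loop never reaches on Pre_ inputs
-- (the first iteration at odd n appends first); the getD 0 default is unreachable there.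
def pvIncLast (lst : List Int) : List Int := lst.dropLast ++ [lst.getLast?.getD 0 + 1]

-- the while-loop of A, made total by fuel (fuel exhaustion returns the current lst)
def pvLoopA (fuel : Nat) (n : Int) (lst : List Int) : List Int :=
  match fuel with
  | 0 => lst
  | f + 1 =>
    if n ≠ 1 then
      if PySem.Int.mod n 2 = 0 then pvLoopA f (PySem.Int.floordiv n 2) (pvIncLast lst)
      else pvLoopA f (3 * n + 1) (lst ++ [0])
    else lst

def encode_integer (n : Int) : List Int := pvLoopA 1000000 n []

-- ===== PORT B =====
-- B's nested while-loops, made total by the same fuel budget: one fuel unit per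
-- outer odd step and one per inner halving (bisimilar accounting with A's loop).
mutual
  def pvOuterB (fuel : Nat) (n : Int) (lst : List Int) : List Int :=
    match fuel with
    | 0 => lst
    | f + 1 => if n ≠ 1 then pvInnerB f (3 * n + 1) 0 lst else lst
  termination_by (fuel, 0)
  decreasing_by all_goals simp_wf <;> omega
  def pvInnerB (fuel : Nat) (m : Int) (c : Int) (lst : List Int) : List Int :=
    match fuel with
    | 0 => lst ++ [c]
    | f + 1 =>
      if PySem.Int.mod m 2 = 0 then pvInnerB f (PySem.Int.floordiv m 2) (c + 1) lst
      else pvOuterB (f + 1) m (lst ++ [c])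
  termination_by (fuel, 1)
  decreasing_by all_goals simp_wf <;> omega
end

def encode_integer_alt (n : Int) : List Int := pvOuterB 1000000 n []

-- ===== PRECONDITION & SPEC =====
-- Pre_ excludes even n, on which A raises ValueError, and non-positive odd n, on which
-- A's while-loop never terminates (negative odd inputs fall into a cycle); on positive
-- odd inputs within Dom A returns normally.
def Pre_encode_integer (n : Int) : Prop := PySem.Int.mod n 2 = 1 ∧ 1 ≤ n
instance (n : Int) : Decidable (Pre_encode_integer n) := by unfold Pre_encode_integer; infer_instance
def pvWitness_encode_integer : Int := (7)
def Spec_encode_integer (n : Int) (out : List Int) : Prop := out = encode_integer_alt n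
instance (n : Int) (out : List Int) : Decidable (Spec_encode_integer n out) := by unfold Spec_encode_integer; infer_instance

-- ===== CLAIM (what is proved, stated in full; the proofs are below) =====
def Claim_equal_encode_integer : Prop := ∀ (n : Int), Dom_encode_integer n → Pre_encode_integer n → Spec_encode_integer n (encode_integer n)

-- ===== LEMMAS AND PROOFS =====

-- bisimulation of the two fueled loops: B's outer loop at an odd n is A's loop, and
-- B's inner loop with pending count c is A's loop on lst ++ [c] (also at fuel exhaustion)
theorem pvLoop_bisim (f : Nat) :
    (∀ (n : Int) (lst : List Int), PySem.Int.mod n 2 ≠ 0 → pvOuterB f n lst = pvLoopA f n lst) ∧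
    (∀ (m c : Int) (lst : List Int), pvInnerB f m c lst = pvLoopA f m (lst ++ [c])) := by
  induction f with
  | zero =>
    constructor
    · intro n lst _; simp [pvOuterB, pvLoopA]
    · intro m c lst; simp [pvInnerB, pvLoopA]
  | succ f ih =>
    have h1 : ∀ (n : Int) (lst : List Int), PySem.Int.mod n 2 ≠ 0 →
        pvOuterB (f + 1) n lst = pvLoopA (f + 1) n lst := by
      intro n lst hodd
      by_cases hn : n = 1
      · simp [pvOuterB, pvLoopA, hn]
      · simp only [pvOuterB, pvLoopA, if_pos hn, if_neg hodd]
        exact ih.2 _ 0 _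
    constructor
    · exact h1
    · intro m c lst
      by_cases he : PySem.Int.mod m 2 = 0
      · have hm1 : m ≠ 1 := by
          intro h; rw [h] at he; simp [PySem.Int.mod] at he
        rw [pvInnerB, if_pos he, pvLoopA, if_pos hm1, if_pos he, ih.2]
        have : pvIncLast (lst ++ [c]) = lst ++ [c + 1] := by
          simp [pvIncLast]
        rw [this]
      · rw [pvInnerB, if_neg he, h1 m (lst ++ [c]) he]

-- ===== VERDICT (by name: the statement is the Claim_ definition above) =====
theorem encode_integer_spec : Claim_equal_encode_integer := by
  intro n _ hpre
  unfold Spec_encode_integer encode_integer encode_integer_alt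
  exact ((pvLoop_bisim 1000000).1 n [] (by rw [hpre.1]; omega)).symm
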